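-- pv_equiv track=rewrite | github.com/MarkMesbur/Leetcode | 2120-execution-of-all-suffix-instructions-staying-in-a-grid/2120-execution-of-all-suffix-instructions-staying-in-a-grid.py | stepcount
-- ===== SOURCE A (Python) =====
-- def stepcount(n, s, xstart, ystart, i):
--     count = 0
--     for j in range(i, len(s)):
--         if s[j] == "R":
--             xstart += 1
--         elif s[j] == "L":
--             xstart -= 1
--         elif s[j] == "U":
--             ystart -= 1
--         elif s[j] == "D":
--             ystart += 1
--
--         if xstart < 0 or ystart < 0 or xstart >= n or ystart >= n:
--             return count
--         count += 1
--     return count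
-- ===== SOURCE B (Python) =====
-- from itertools import accumulate
--
-- _DELTA = {"R": (1, 0), "L": (-1, 0), "U": (0, -1), "D": (0, 1)}
--
-- def stepcount(n, s, xstart, ystart, i):
--     # pass 1: build the full trajectory of positions for the walk starting at s[i]
--     moves = [_DELTA.get(s[j], (0, 0)) for j in range(i, len(s))]
--     positions = list(accumulate(moves, lambda p, d: (p[0] + d[0], p[1] + d[1]),
--                                 initial=(xstart, ystart)))[1:]
--     # pass 2: index of the first out-of-bounds position, or the full walk length
--     for k, (x, y) in enumerate(positions):
--         if x < 0 or y < 0 or x >= n or y >= n: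
--             return k
--     return len(positions)
-- ===== Notes on version B (the rewrite author's own statement) =====
-- stated objective: alternative
-- what changed: A's single interleaved loop (mutate position, bounds-check, count, early return) is split into two passes: build the full trajectory of positions with itertools.accumulate over a per-character delta table, then a separate scan that returns the index of the first out-of-bounds position (or the trajectory length).
import Mathlib
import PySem

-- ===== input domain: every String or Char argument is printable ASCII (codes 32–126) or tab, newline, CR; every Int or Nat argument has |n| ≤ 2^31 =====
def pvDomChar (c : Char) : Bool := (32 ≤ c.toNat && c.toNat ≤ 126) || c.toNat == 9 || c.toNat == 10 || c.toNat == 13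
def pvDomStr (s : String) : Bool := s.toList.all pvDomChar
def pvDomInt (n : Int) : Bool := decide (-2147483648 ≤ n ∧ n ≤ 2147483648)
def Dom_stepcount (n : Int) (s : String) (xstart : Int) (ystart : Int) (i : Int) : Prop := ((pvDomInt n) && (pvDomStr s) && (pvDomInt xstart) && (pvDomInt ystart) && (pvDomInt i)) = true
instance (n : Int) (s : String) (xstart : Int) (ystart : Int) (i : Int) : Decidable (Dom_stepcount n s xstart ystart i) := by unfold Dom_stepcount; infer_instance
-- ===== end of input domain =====

-- B splits A's interleaved move/check/count loop into two passes: build the whole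
-- trajectory of positions (scan/accumulate), then find the first out-of-bounds index
-- (objective: alternative decomposition, same cost).


-- ===== PORT A =====
-- A's for-loop over range(i, len(s)) with early return; s[j] via pyGet?
-- (the .getD ' ' default is only reached outside Pre_, where Python raises IndexError)
def pvStepA (n : Int) (chars : List Char) (rng : List Int) (x y cnt : Int) : Int :=
  match rng with
  | [] => cnt
  | j :: rest =>
    let c := (PySem.List.pyGet? chars j).getD ' '
    let p :=
      if c = 'R' then (x + 1, y)
      else if c = 'L' then (x - 1, y)
      else if c = 'U' then (x, y - 1)
      else if c = 'D' then (x, y + 1)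
      else (x, y)
    if p.1 < 0 ∨ p.2 < 0 ∨ p.1 ≥ n ∨ p.2 ≥ n then cnt
    else pvStepA n chars rest p.1 p.2 (cnt + 1)

def stepcount (n : Int) (s : String) (xstart : Int) (ystart : Int) (i : Int) : Int :=
  pvStepA n s.toList (PySem.List.pyRange i (s.toList.length : Int) 1) xstart ystart 0

-- ===== PORT B =====
def pvDelta : PySem.Dict Char (Int × Int) :=
  PySem.Dict.ofList [('R', (1, 0)), ('L', (-1, 0)), ('U', (0, -1)), ('D', (0, 1))]

-- _DELTA.get(s[j], (0, 0))
def pvMove (chars : List Char) (j : Int) : Int × Int :=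
  PySem.Dict.getD pvDelta ((PySem.List.pyGet? chars j).getD ' ') (0, 0)

-- the 'for k, (x, y) in enumerate(positions)' search, k the running index
def pvFindExit (n : Int) : List (Int × Int) → Int → Int
  | [], k => k
  | (x, y) :: rest, k =>
    if x < 0 ∨ y < 0 ∨ x ≥ n ∨ y ≥ n then k else pvFindExit n rest (k + 1)

def stepcount_alt (n : Int) (s : String) (xstart : Int) (ystart : Int) (i : Int) : Int :=
  let moves := (PySem.List.pyRange i (s.toList.length : Int) 1).map (pvMove s.toList)
  -- itertools.accumulate with initial=(xstart, ystart), then [1:]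
  let positions := (List.scanl (fun p d => (p.1 + d.1, p.2 + d.2)) (xstart, ystart) moves).tail
  pvFindExit n positions 0

-- ===== PRECONDITION & SPEC =====
-- Pre_ excludes only i < -len(s), where Python A (and B alike) raises IndexError on s[j].
def Pre_stepcount (n : Int) (s : String) (xstart : Int) (ystart : Int) (i : Int) : Prop :=
  -(s.toList.length : Int) ≤ i
instance (n : Int) (s : String) (xstart : Int) (ystart : Int) (i : Int) : Decidable (Pre_stepcount n s xstart ystart i) := by unfold Pre_stepcount; infer_instance

def pvWitness_stepcount : Int × String × Int × Int × Int := (2, "RUD", 0, 0, 0)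

def Spec_stepcount (n : Int) (s : String) (xstart : Int) (ystart : Int) (i : Int) (out : Int) : Prop := out = stepcount_alt n s xstart ystart i
instance (n : Int) (s : String) (xstart : Int) (ystart : Int) (i : Int) (out : Int) : Decidable (Spec_stepcount n s xstart ystart i out) := by unfold Spec_stepcount; infer_instance

-- ===== CLAIM (what is proved, stated in full; the proofs are below) =====
def Claim_equal_stepcount : Prop := ∀ (n : Int) (s : String) (xstart : Int) (ystart : Int) (i : Int), Dom_stepcount n s xstart ystart i → Pre_stepcount n s xstart ystart i → Spec_stepcount n s xstart ystart i (stepcount n s xstart ystart i)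

-- ===== LEMMAS AND PROOFS =====

-- A's elif-chain update equals adding B's delta-dict entry componentwise.
theorem pvMove_eq (chars : List Char) (j : Int) (x y : Int) :
    (let c := (PySem.List.pyGet? chars j).getD ' '
     if c = 'R' then (x + 1, y)
     else if c = 'L' then (x - 1, y)
     else if c = 'U' then (x, y - 1)
     else if c = 'D' then (x, y + 1)
     else (x, y))
    = ((x, y).1 + (pvMove chars j).1, (x, y).2 + (pvMove chars j).2) := by
  have hmk : pvDelta =
      PySem.Dict.mk [('R', (1, 0)), ('L', (-1, 0)), ('U', (0, -1)), ('D', (0, 1))] := by decide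
  unfold pvMove
  generalize (PySem.List.pyGet? chars j).getD ' ' = c
  simp only []
  split_ifs with h1 h2 h3 h4 <;>
    first
      | (simp_all [hmk, PySem.Dict.getD, PySem.Dict.get?_mk_cons] <;> omega)
      | (have e1 : ('R' == c) = false := beq_eq_false_iff_ne.mpr (Ne.symm h1)
         have e2 : ('L' == c) = false := beq_eq_false_iff_ne.mpr (Ne.symm h2)
         have e3 : ('U' == c) = false := beq_eq_false_iff_ne.mpr (Ne.symm h3)
         have e4 : ('D' == c) = false := beq_eq_false_iff_ne.mpr (Ne.symm h4)
         simp [hmk, PySem.Dict.getD, PySem.Dict.get?, List.find?, e1, e2, e3, e4])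

theorem pvStepA_eq_findExit (n : Int) (chars : List Char) (rng : List Int)
    (x y cnt : Int) :
    pvStepA n chars rng x y cnt =
      pvFindExit n
        ((List.scanl (fun p d => (p.1 + d.1, p.2 + d.2)) (x, y)
          (rng.map (pvMove chars))).tail) cnt := by
  induction rng generalizing x y cnt with
  | nil => simp [pvStepA, pvFindExit]
  | cons j rest ih =>
    rw [List.map_cons, List.scanl_cons, List.tail_cons]
    rw [show ∀ (p : Int × Int) (ms : List (Int × Int)),
          List.scanl (fun p d => (p.1 + d.1, p.2 + d.2)) p ms =
            p :: (List.scanl (fun p d => (p.1 + d.1, p.2 + d.2)) p ms).tail from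
          by intro p ms; cases ms <;> simp]
    rw [pvStepA, pvMove_eq chars j x y]
    simp only [pvFindExit]
    split_ifs with h
    · rfl
    · exact ih _ _ _

-- ===== VERDICT (by name: the statement is the Claim_ definition above) =====
theorem stepcount_spec : Claim_equal_stepcount := by
  intro n s xstart ystart i _ _
  unfold Spec_stepcount stepcount stepcount_alt
  exact pvStepA_eq_findExit n s.toList _ xstart ystart 0
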